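-- pv_equiv track=rewrite | github.com/radadiyamohit81/Code-for-FAANG | Binary Search/Binary-Search-5/Find Function Arguments .py | find_all_pairs
-- ===== SOURCE A (Python) =====
-- def f(x, y):
--     return x**2 +y
--
-- def find_all_pairs(z):
--     ans = []
--     for x in range(1, z + 1):
--         low, high = 1, z
--         while low <= high:
--             y = mid = (low + high) // 2
--             if f(x, y) == z:
--                 ans.append([x, y])
--                 break
--             elif f(x, y) > z:
--                 high = mid -1
--             else:
--                 low = mid + 1
--     return ans
-- ===== SOURCE B (Python) =====
-- def find_all_pairs(z):
--     # For each x, the unique y with x**2 + y == z is y = z - x**2; it lies in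
--     # [1, z] exactly when x**2 < z. Walk x upward until x**2 >= z.
--     ans = []
--     x = 1
--     while x * x < z:
--         ans.append([x, z - x * x])
--         x += 1
--     return ans
-- ===== Notes on version B (the rewrite author's own statement) =====
-- stated objective: faster
-- what changed: Replaces the per-x binary search over [1,z] by the direct solution y = z - x^2, stopping as soon as x^2 >= z, so only ~sqrt(z) iterations with O(1) work each.
import Mathlib
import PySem

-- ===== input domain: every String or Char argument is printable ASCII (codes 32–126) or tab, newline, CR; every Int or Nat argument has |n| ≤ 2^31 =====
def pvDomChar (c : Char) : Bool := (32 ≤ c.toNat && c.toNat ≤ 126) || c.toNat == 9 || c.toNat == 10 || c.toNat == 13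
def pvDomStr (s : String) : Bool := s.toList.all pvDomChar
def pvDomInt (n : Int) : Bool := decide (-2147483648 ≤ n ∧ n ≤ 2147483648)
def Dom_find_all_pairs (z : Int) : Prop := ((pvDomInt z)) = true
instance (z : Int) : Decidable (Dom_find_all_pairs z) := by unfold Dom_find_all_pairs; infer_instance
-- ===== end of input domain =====

-- B replaces A's per-x binary search by the direct solution y = z - x^2 with an
-- early stop at x^2 >= z (objective: faster, asymptotic).


-- ===== PORT A =====
def pyF (x y : Int) : Int := x ^ 2 + y

-- the inner 'while low <= high' binary search; returns the y appended (break), none if the loop ends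
def bsearchA (x z low high : Int) : Option Int :=
  if _h : low ≤ high then
    let mid := PySem.Int.floordiv (low + high) 2
    let y := mid
    if pyF x y = z then some y
    else if pyF x y > z then bsearchA x z low (mid - 1)
    else bsearchA x z (mid + 1) high
  else none
termination_by (high + 1 - low).toNat
decreasing_by
  · have := PySem.Int.floordiv_two_mid_bounds _h; omega
  · have := PySem.Int.floordiv_two_mid_bounds _h; omega

def find_all_pairs (z : Int) : List (List Int) :=
  (PySem.List.pyRange 1 (z + 1) 1).foldl
    (fun ans x =>
      match bsearchA x z 1 z with
      | some y => ans ++ [[x, y]]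
      | none => ans) []

-- ===== PORT B =====
-- 'while x*x < z: ans.append([x, z-x*x]); x += 1', building the list head-first
def altLoop (z x : Int) : List (List Int) :=
  if _h : x * x < z then [x, z - x * x] :: altLoop z (x + 1)
  else []
termination_by (z - x).toNat
decreasing_by
  have hx : x ≤ x * x := by nlinarith
  omega

def find_all_pairs_alt (z : Int) : List (List Int) := altLoop z 1

-- ===== PRECONDITION & SPEC =====
def Spec_find_all_pairs (z : Int) (out : List (List Int)) : Prop := out = find_all_pairs_alt z
instance (z : Int) (out : List (List Int)) : Decidable (Spec_find_all_pairs z out) := by unfold Spec_find_all_pairs; infer_instance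

-- ===== CLAIM (what is proved, stated in full; the proofs are below) =====
def Claim_equal_find_all_pairs : Prop := ∀ (z : Int), Dom_find_all_pairs z → Spec_find_all_pairs z (find_all_pairs z)

-- ===== LEMMAS AND PROOFS =====

-- the binary search finds exactly the y = z - x^2 in [low, high], if any
theorem bsearchA_eq (x z low high : Int) :
    bsearchA x z low high =
      if low ≤ z - x ^ 2 ∧ z - x ^ 2 ≤ high then some (z - x ^ 2) else none := by
  fun_induction bsearchA x z low high with
  | case1 low high h mid y heq =>
    simp only [pyF] at heq
    have hy : y = PySem.Int.floordiv (low + high) 2 := rfl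
    have hm := PySem.Int.floordiv_two_mid_bounds h
    rw [if_pos (by omega)]
    have : y = z - x ^ 2 := by omega
    rw [this]
  | case2 low high h mid y heq hgt ih =>
    simp only [pyF] at heq hgt
    have hy : y = PySem.Int.floordiv (low + high) 2 := rfl
    have hm := PySem.Int.floordiv_two_mid_bounds h
    rw [ih]
    split_ifs <;> first | rfl | omega
  | case3 low high h mid y heq hgt ih =>
    simp only [pyF] at heq hgt
    have hy : y = PySem.Int.floordiv (low + high) 2 := rfl
    have hm := PySem.Int.floordiv_two_mid_bounds h
    rw [ih]
    split_ifs <;> first | rfl | omega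
  | case4 low high h =>
    rw [if_neg (by omega)]

theorem bsearchA_one_z (x z : Int) :
    bsearchA x z 1 z = if x * x < z then some (z - x * x) else none := by
  have hnn : 0 ≤ x * x := mul_self_nonneg x
  rw [bsearchA_eq]
  simp only [pow_two]
  split_ifs <;> first | rfl | omega

-- once x*x ≥ z (and 1 ≤ x), the remaining range contributes nothing
theorem tail_nil (z x : Int) (hx : 1 ≤ x) (hz : z ≤ x * x) (acc : List (List Int)) :
    (PySem.List.pyRange x (z + 1) 1).foldl
      (fun ans x =>
        match bsearchA x z 1 z with
        | some y => ans ++ [[x, y]]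
        | none => ans) acc = acc := by
  by_cases hxz : z + 1 ≤ x
  · rw [PySem.List.pyRange_one_eq_nil hxz]; rfl
  · rw [PySem.List.pyRange_one_cons (by omega)]
    simp only [List.foldl_cons]
    rw [bsearchA_one_z x z, if_neg (by omega)]
    exact tail_nil z (x + 1) (by omega) (by nlinarith) acc
termination_by (z + 1 - x).toNat

-- main loop invariant: A's fold from x equals acc ++ B's loop from x
theorem loop_eq (z x : Int) (hx : 1 ≤ x) (acc : List (List Int)) :
    (PySem.List.pyRange x (z + 1) 1).foldl
      (fun ans x =>
        match bsearchA x z 1 z with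
        | some y => ans ++ [[x, y]]
        | none => ans) acc = acc ++ altLoop z x := by
  by_cases hxz : z + 1 ≤ x
  · rw [PySem.List.pyRange_one_eq_nil hxz, altLoop,
      dif_neg (show ¬ x * x < z by nlinarith)]
    simp
  · rw [PySem.List.pyRange_one_cons (by omega)]
    simp only [List.foldl_cons]
    rw [bsearchA_one_z x z]
    by_cases hlt : x * x < z
    · rw [if_pos hlt, loop_eq z (x + 1) (by omega)]
      conv_rhs => rw [altLoop]
      rw [dif_pos hlt]
      simp
    · rw [if_neg hlt]
      conv_rhs => rw [altLoop]
      rw [dif_neg hlt, List.append_nil]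
      exact tail_nil z (x + 1) (by omega) (by nlinarith [not_lt.mp hlt]) acc
termination_by (z + 1 - x).toNat

-- ===== VERDICT (by name: the statement is the Claim_ definition above) =====
theorem find_all_pairs_spec : Claim_equal_find_all_pairs := by
  intro z _
  show find_all_pairs z = find_all_pairs_alt z
  unfold find_all_pairs find_all_pairs_alt
  simpa using loop_eq z 1 le_rfl []
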